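-- pv_equiv track=rewrite | github.com/mlevesquedion/daily_coding_problem_solutions | 370.py | solve
-- ===== SOURCE A (Python) =====
-- def solve(data):
--     picked_up = {}
--     active_time = 0
--     for (id_, epoch, _) in data:
--         # This assumes for every entry, the pickup occurs before
--         # the dropoff. If this is not the case, a simple two-pass
--         # approach can be used without affecting the complexity.
--         if id_ in picked_up:
--             active_time += epoch - picked_up[id_]
--             picked_up.pop(id_)
--         else:
--             picked_up[id_] = epoch
--     return active_time
-- ===== SOURCE B (Python) =====
-- def solve(data):
--     groups = {}
--     for (id_, epoch, _) in data:
--         groups.setdefault(id_, []).append(epoch)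
--     total = 0
--     for epochs in groups.values():
--         while len(epochs) >= 2:
--             total += epochs[1] - epochs[0]
--             epochs = epochs[2:]
--     return total
-- ===== Notes on version B (the rewrite author's own statement) =====
-- stated objective: alternative
-- what changed: Replaces the online toggle-dict pass (pending pickup removed on dropoff, running accumulator) by a two-phase computation: first group each id's epochs in encounter order into a dict, then a second pairwise-reduce pass over each group summing epochs[1]-epochs[0] two at a time.
import Mathlib
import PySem

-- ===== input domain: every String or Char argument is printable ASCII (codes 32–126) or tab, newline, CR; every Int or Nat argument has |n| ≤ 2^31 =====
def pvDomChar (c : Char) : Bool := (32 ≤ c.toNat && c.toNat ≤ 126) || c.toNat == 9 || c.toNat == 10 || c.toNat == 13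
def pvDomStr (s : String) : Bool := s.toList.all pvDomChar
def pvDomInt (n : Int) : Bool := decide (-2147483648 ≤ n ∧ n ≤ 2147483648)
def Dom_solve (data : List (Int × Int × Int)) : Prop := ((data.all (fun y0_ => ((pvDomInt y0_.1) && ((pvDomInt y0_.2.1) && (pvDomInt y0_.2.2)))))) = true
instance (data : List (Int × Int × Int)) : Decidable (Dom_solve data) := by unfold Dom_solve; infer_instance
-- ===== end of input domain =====

-- B replaces A's online toggle-dict pass by grouping epochs per id and then pairwise-reducing
-- each group in a second pass (objective: alternative decomposition, same O(n) cost).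

-- ===== PORT A =====
-- one step of A's loop body over state (picked_up, active_time)
def solveStep (s : PySem.Dict Int Int × Int) (t : Int × Int × Int) : PySem.Dict Int Int × Int :=
  if s.1.contains t.1 then
    -- active_time += epoch - picked_up[id_]; picked_up.pop(id_)
    -- the lookup is guarded by 'id_ in picked_up', so getD 0 is exact here
    (s.1.erase t.1, s.2 + (t.2.1 - (s.1.get? t.1).getD 0))
  else
    (s.1.insert t.1 t.2.1, s.2)

def solve (data : List (Int × Int × Int)) : Int :=
  (data.foldl solveStep (PySem.Dict.empty, 0)).2

-- ===== PORT B =====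
-- the 'while len(epochs) >= 2: total += epochs[1]-epochs[0]; epochs = epochs[2:]' loop
def pairActive (total : Int) : List Int → Int
  | a :: b :: rest => pairActive (total + (b - a)) rest
  | _ => total

-- groups.setdefault(id_, []).append(epoch) is modify with default []
def solveGroups (data : List (Int × Int × Int)) : PySem.Dict Int (List Int) :=
  data.foldl (fun d t => d.modify t.1 [] (fun l => l ++ [t.2.1])) PySem.Dict.empty

def solve_alt (data : List (Int × Int × Int)) : Int :=
  (solveGroups data).values.foldl (fun total es => pairActive total es) 0

-- ===== PRECONDITION & SPEC =====
def Spec_solve (data : List (Int × Int × Int)) (out : Int) : Prop := out = solve_alt data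
instance (data : List (Int × Int × Int)) (out : Int) : Decidable (Spec_solve data out) := by unfold Spec_solve; infer_instance

-- ===== CLAIM (what is proved, stated in full; the proofs are below) =====
def Claim_equal_solve : Prop := ∀ (data : List (Int × Int × Int)), Dom_solve data → Spec_solve data (solve data)

-- ===== LEMMAS AND PROOFS =====

-- the epochs of id k in data, in encounter order
def eps (k : Int) (data : List (Int × Int × Int)) : List Int :=
  (data.filter (fun t => t.1 == k)).map (fun t => t.2.1)

theorem pairActive_shift : ∀ (es : List Int) (t : Int), pairActive t es = t + pairActive 0 es
  | [], _ => by simp [pairActive]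
  | [_], _ => by simp [pairActive]
  | a :: b :: rest, t => by
      simp only [pairActive]
      rw [pairActive_shift rest (t + (b - a)), pairActive_shift rest (0 + (b - a))]
      ring

theorem get?_erase (d : PySem.Dict Int Int) (k k' : Int) :
    (d.erase k).get? k' = if k' = k then none else d.get? k' := by
  obtain ⟨items⟩ := d
  simp only [PySem.Dict.erase, PySem.Dict.get?]
  induction items with
  | nil => simp
  | cons p rest ih =>
      by_cases hpk : p.1 = k
      · rw [List.filter_cons_of_neg (by simp [hpk])]
        by_cases hk' : k' = k
        · simp [hk']
        · rw [List.find?_cons_of_neg (by simp [hpk]; omega), ih, if_neg hk']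
      · rw [List.filter_cons_of_pos (by simp [hpk])]
        by_cases hp' : p.1 = k'
        · have hk' : ¬ k' = k := fun h => hpk (hp'.trans h)
          rw [List.find?_cons_of_pos (by simp [hp']),
            List.find?_cons_of_pos (by simp [hp']), if_neg hk']
        · rw [List.find?_cons_of_neg (by simp [hp']),
            List.find?_cons_of_neg (by simp [hp']), ih]

theorem keys_erase_sublist (d : PySem.Dict Int Int) (k : Int) :
    (d.erase k).keys.Sublist d.keys := by
  obtain ⟨items⟩ := d
  simp only [PySem.Dict.erase, PySem.Dict.keys]
  exact List.Sublist.map _ List.filter_sublist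

theorem contains_erase_imp (d : PySem.Dict Int Int) (k k' : Int)
    (h : (d.erase k).contains k' = true) : d.contains k' = true := by
  rw [PySem.Dict.contains_eq_isSome_get?] at h ⊢
  rw [get?_erase] at h
  by_cases hk : k' = k
  · simp [hk] at h
  · simpa [hk] using h

theorem pairActive_cons2 (p e : Int) (l : List Int) :
    pairActive 0 (p :: e :: l) = (e - p) + pairActive 0 l := by
  simp only [pairActive]
  rw [pairActive_shift l (0 + (e - p))]
  ring

theorem pairActive_small (o : Option Int) : pairActive 0 (o.toList ++ []) = 0 := by
  cases o <;> simp [pairActive]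

theorem A_loop (data : List (Int × Int × Int)) :
    ∀ (d : PySem.Dict Int Int) (a : Int) (s : Finset Int),
      d.keys.Nodup →
      (∀ k, d.contains k = true → k ∈ s) →
      (∀ t ∈ data, t.1 ∈ s) →
      (data.foldl solveStep (d, a)).2
        = a + ∑ k ∈ s, pairActive 0 ((d.get? k).toList ++ eps k data) := by
  induction data with
  | nil =>
      intro d a s _ _ _
      simp only [List.foldl_nil, eps, List.filter_nil, List.map_nil]
      rw [Finset.sum_eq_zero (fun k _ => pairActive_small _)]
      ring
  | cons t rest ih =>
      intro d a s hnd hd hdata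
      obtain ⟨i, e, c⟩ := t
      have hiS : i ∈ s := hdata (i, e, c) (List.mem_cons_self)
      have heps : ∀ k, eps k ((i, e, c) :: rest) =
          if i = k then e :: eps k rest else eps k rest := by
        intro k
        by_cases hik : i = k <;> simp [eps, hik]
      simp only [List.foldl_cons]
      by_cases h : d.contains i = true
      · -- dropoff: erase + accumulate
        have hsome : (d.get? i).isSome := by
          rw [PySem.Dict.contains_eq_isSome_get?] at h; exact h
        obtain ⟨p, hp⟩ := Option.isSome_iff_exists.mp hsome
        have hstep : solveStep (d, a) (i, e, c) = (d.erase i, a + (e - p)) := by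
          simp [solveStep, h, hp]
        rw [hstep,
          ih (d.erase i) (a + (e - p)) s
            (List.Nodup.sublist (keys_erase_sublist d i) hnd)
            (fun k hk => hd k (contains_erase_imp d i k hk))
            (fun t ht => hdata t (List.mem_cons_of_mem _ ht))]
        rw [← Finset.add_sum_erase s _ hiS, ← Finset.add_sum_erase s
          (fun k => pairActive 0 ((d.get? k).toList ++ eps k ((i, e, c) :: rest))) hiS]
        have hterm : pairActive 0 (((d.erase i).get? i).toList ++ eps i rest) + (e - p)
            = pairActive 0 ((d.get? i).toList ++ eps i ((i, e, c) :: rest)) := by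
          rw [get?_erase, heps i, if_pos rfl, if_pos rfl, hp]
          simp only [Option.toList_some, Option.toList_none, List.nil_append, List.cons_append]
          rw [pairActive_cons2]
          ring
        have hrest : ∑ k ∈ s.erase i, pairActive 0 (((d.erase i).get? k).toList ++ eps k rest)
            = ∑ k ∈ s.erase i, pairActive 0 ((d.get? k).toList ++ eps k ((i, e, c) :: rest)) := by
          refine Finset.sum_congr rfl (fun k hk => ?_)
          have hki : ¬ k = i := (Finset.mem_erase.mp hk).1
          rw [get?_erase, heps k, if_neg hki, if_neg (fun h' => hki h'.symm)]
        rw [hrest]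
        linarith [hterm]
      · -- pickup: insert, accumulator unchanged
        have hnone : d.get? i = none :=
          (PySem.Dict.get?_eq_none_iff_contains d i).mpr (by simpa using h)
        have hstep : solveStep (d, a) (i, e, c) = (d.insert i e, a) := by
          simp [solveStep, h]
        rw [hstep,
          ih (d.insert i e) a s
            (PySem.Dict.nodup_keys_insert d i e hnd)
            (fun k hk => by
              rw [PySem.Dict.contains_insert] at hk
              rcases Bool.or_eq_true_iff.mp hk with h1 | h2
              · have : k = i := by simpa using h1
                simpa [this] using hiS
              · exact hd k h2)
            (fun t ht => hdata t (List.mem_cons_of_mem _ ht))]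
        congr 1
        refine Finset.sum_congr rfl (fun k _ => ?_)
        by_cases hk : k = i
        · subst hk
          rw [PySem.Dict.get?_insert_self, hnone, heps k, if_pos rfl]
          rfl
        · rw [PySem.Dict.get?_insert_of_ne d e hk, heps k, if_neg (fun h' => hk h'.symm)]

theorem solve_eq_sum (data : List (Int × Int × Int)) :
    solve data = ∑ k ∈ (data.map (·.1)).toFinset, pairActive 0 (eps k data) := by
  unfold solve
  rw [A_loop data PySem.Dict.empty 0 ((data.map (·.1)).toFinset)
    (PySem.Dict.nodup_keys_empty)
    (fun k hk => by simp [PySem.Dict.contains_empty] at hk)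
    (fun t ht => by
      rw [List.mem_toFinset]
      exact List.mem_map_of_mem ht)]
  simp [PySem.Dict.get?_empty]

theorem solve_alt_eq_sum (data : List (Int × Int × Int)) :
    solve_alt data = ∑ k ∈ (data.map (·.1)).toFinset, pairActive 0 (eps k data) := by
  unfold solve_alt
  have hfold : solveGroups data
      = (data.map (fun t => (t.1, t.2.1))).foldl
          (fun d p => d.modify p.1 [] (fun l => l ++ [p.2])) PySem.Dict.empty := by
    unfold solveGroups
    rw [List.foldl_map]
  have hnd : (solveGroups data).keys.Nodup := by
    rw [hfold]
    exact PySem.Dict.nodup_keys_foldl_modify_key (data.map (fun t => (t.1, t.2.1))) (·.1) []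
      (fun _ p => fun l => l ++ [p.2]) PySem.Dict.empty
      (by simp [PySem.Dict.keys_empty])
  have hkeys : (solveGroups data).keys = PySem.Set.ofList (data.map (·.1)) := by
    rw [hfold, PySem.Dict.keys_foldl_modify_key]
    have h1 : (data.map (fun t => (t.1, t.2.1))).map (·.1) = data.map (·.1) := by
      simp [List.map_map, Function.comp]
    rw [h1]
    simp [PySem.Dict.keys_empty, PySem.Set.update, PySem.Set.ofList_eq_foldl]
  have hgetD : ∀ k, (solveGroups data).getD k [] = eps k data := by
    intro k
    rw [hfold, PySem.Dict.getD_foldl_modify_append]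
    simp only [PySem.Dict.getD_empty, List.nil_append]
    rw [List.filter_map, List.map_map]
    rfl
  rw [PySem.Dict.values_eq_map_keys _ hnd [], hkeys]
  have hshift : ∀ (l : List (List Int)),
      l.foldl (fun total es => pairActive total es) 0
        = (l.map (pairActive 0)).sum := by
    intro l
    have h := PySem.List.foldl_congr_mem
      (f := fun total es => pairActive total es)
      (g := fun total es => total + pairActive 0 es)
      (l := l) (init := (0 : Int))
      (fun acc x _ => pairActive_shift x acc)
    rw [h, PySem.List.foldl_add]
    simp
  rw [hshift, List.map_map]
  have hmapped : (PySem.Set.ofList (data.map (·.1))).map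
      (pairActive 0 ∘ fun k => (solveGroups data).getD k [])
      = (PySem.Set.ofList (data.map (·.1))).map (fun k => pairActive 0 (eps k data)) := by
    refine List.map_congr_left (fun k _ => ?_)
    simp [hgetD k]
  rw [hmapped]
  have hnodup : (PySem.Set.ofList (data.map (·.1))).Nodup := PySem.Set.nodup_ofList _
  have hfin : (PySem.Set.ofList (data.map (·.1))).toFinset = (data.map (·.1)).toFinset := by
    ext x
    simp [List.mem_toFinset, PySem.Set.mem_ofList]
  rw [← List.sum_toFinset _ hnodup, hfin]

-- ===== VERDICT (by name: the statement is the Claim_ definition above) =====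
theorem solve_spec : Claim_equal_solve := by
  intro data _
  unfold Spec_solve
  rw [solve_eq_sum, solve_alt_eq_sum]
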